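-- pv_equiv track=rewrite | github.com/PandeApeksha/apeksha_pande_FBS_work | Core_Python/Assignments/Assignment12.py/exchang_char.py | exchange_char
-- ===== SOURCE A (Python) =====
-- def exchange_char(str):
--     new_str = ''
--     for char in range(len(str)):
--         if (char == 0):
--             new_str += str[-1]
--         elif (char == len(str) - 1):
--             new_str += str[0]
--         else:
--             new_str += str[char]
--     return new_str
-- ===== SOURCE B (Python) =====
-- def exchange_char(str):
--     if len(str) < 2:
--         return str
--     return str[-1] + str[1:-1] + str[0]
-- ===== Notes on version B (the rewrite author's own statement) =====
-- stated objective: simpler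
-- what changed: Replaced the per-index loop with three branches building the string character by character with a guarded closed-form slice expression str[-1] + str[1:-1] + str[0].
import Mathlib
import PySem

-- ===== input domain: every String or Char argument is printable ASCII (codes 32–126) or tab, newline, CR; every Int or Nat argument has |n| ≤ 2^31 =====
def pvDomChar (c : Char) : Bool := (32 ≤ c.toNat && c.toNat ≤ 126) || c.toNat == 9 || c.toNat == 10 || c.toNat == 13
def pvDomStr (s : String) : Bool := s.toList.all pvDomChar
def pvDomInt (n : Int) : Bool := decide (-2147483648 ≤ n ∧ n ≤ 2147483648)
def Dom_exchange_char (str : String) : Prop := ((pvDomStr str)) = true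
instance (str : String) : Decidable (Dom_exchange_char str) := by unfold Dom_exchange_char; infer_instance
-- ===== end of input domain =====

-- B replaces A's per-index loop over the string with a guarded closed-form
-- slice expression str[-1] + str[1:-1] + str[0]; objective: simpler.


-- ===== PORT A =====
-- new_str accumulated as a List Char, converted to String on return
def exchange_char (str : String) : String :=
  let l := str.toList
  String.ofList ((PySem.List.pyRange 0 (l.length : Int) 1).foldl
    (fun new_str char =>
      if char = 0 then new_str ++ [PySem.List.pyGetD l (-1) ' ']
      else if char = (l.length : Int) - 1 then new_str ++ [PySem.List.pyGetD l 0 ' ']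
      else new_str ++ [PySem.List.pyGetD l char ' ']) [])

-- ===== PORT B =====
def exchange_char_alt (str : String) : String :=
  let l := str.toList
  if l.length < 2 then str
  else String.ofList ([PySem.List.pyGetD l (-1) ' ']
        ++ PySem.List.slice l (some 1) (some (-1))
        ++ [PySem.List.pyGetD l 0 ' '])

-- ===== PRECONDITION & SPEC =====
def Spec_exchange_char (str : String) (out : String) : Prop := out = exchange_char_alt str
instance (str : String) (out : String) : Decidable (Spec_exchange_char str out) := by unfold Spec_exchange_char; infer_instance

-- ===== CLAIM (what is proved, stated in full; the proofs are below) =====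
def Claim_equal_exchange_char : Prop := ∀ (str : String), Dom_exchange_char str → Spec_exchange_char str (exchange_char str)

-- ===== LEMMAS AND PROOFS =====

-- A's loop body appends one character per index: it is init ++ map of the branch value
lemma exchange_fold_eq_map (l : List Char) (xs : List Int) (init : List Char) :
    xs.foldl (fun new_str char =>
      if char = 0 then new_str ++ [PySem.List.pyGetD l (-1) ' ']
      else if char = (l.length : Int) - 1 then new_str ++ [PySem.List.pyGetD l 0 ' ']
      else new_str ++ [PySem.List.pyGetD l char ' ']) init
    = init ++ xs.map (fun char =>
      if char = 0 then PySem.List.pyGetD l (-1) ' '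
      else if char = (l.length : Int) - 1 then PySem.List.pyGetD l 0 ' '
      else PySem.List.pyGetD l char ' ') := by
  induction xs generalizing init with
  | nil => simp
  | cons x xs ih => simp only [List.foldl_cons, List.map_cons, ih]; split_ifs <;> simp

-- ===== VERDICT (by name: the statement is the Claim_ definition above) =====
theorem exchange_char_spec : Claim_equal_exchange_char := by
  intro str _
  unfold Spec_exchange_char exchange_char exchange_char_alt
  set l := str.toList with hl
  simp only [exchange_fold_eq_map, List.nil_append]
  by_cases hsmall : l.length < 2
  · rw [if_pos hsmall]
    have hs : String.ofList l = str := by rw [hl]; simp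
    match l, hsmall with
    | [], _ => simpa [PySem.List.pyRange_one_eq_nil] using hs
    | [a], _ =>
      have hr : PySem.List.pyRange 0 ((1:Nat) : Int) 1 = [0] := by decide
      simpa [hr, PySem.List.pyGetD] using hs
  · rw [if_neg hsmall]
    have hn : 2 ≤ l.length := by omega
    apply congrArg String.ofList
    have hslice : PySem.List.slice l (some 1) (some (-1)) = (l.drop 1).take (l.length - 2) := by
      simp [PySem.List.slice]
      have h1 : min 1 l.length = 1 := by omega
      have h2 : l.length - 1 - 1 = l.length - 2 := by omega
      rw [h1, List.drop_one, h2]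
    rw [hslice, List.singleton_append, List.cons_append]
    apply List.ext_getElem
    · simp [PySem.List.length_pyRange_one]
      omega
    · intro i hi1 hi2
      simp only [PySem.List.length_pyRange_one, List.length_map, Int.toNat_natCast, Int.sub_zero] at hi1
      rw [List.getElem_map, PySem.List.getElem_pyRange_one]
      rcases Nat.eq_zero_or_pos i with h0 | hpos
      · subst h0
        norm_num
      · obtain ⟨j, rfl⟩ : ∃ j, i = j + 1 := ⟨i - 1, by omega⟩
        simp only [List.getElem_cons_succ]
        by_cases hlast : j + 1 = l.length - 1
        · have hb : (0 : Int) + ((j + 1 : Nat) : Int) = (l.length : Int) - 1 := by push_cast; omega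
          rw [if_neg (by omega), if_pos hb]
          rw [List.getElem_append_right (by simp; omega)]
          simp
        · have hb : (0 : Int) + ((j + 1 : Nat) : Int) ≠ (l.length : Int) - 1 := by push_cast; omega
          rw [if_neg (by omega), if_neg hb]
          rw [List.getElem_append_left (by simp; omega)]
          have hc : (0 : Int) + ((j + 1 : Nat) : Int) = ((j+1 : Nat) : Int) := by push_cast; ring
          rw [hc, PySem.List.pyGetD_natCast]
          rw [List.getElem_take, List.getElem_drop]
          rw [List.getD_eq_getElem _ _ (by omega)]
          congr 1
          omega
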